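-- pv_equiv track=rewrite | github.com/WuGavin/Code | 20181205/2.py | func
-- ===== SOURCE A (Python) =====
-- def maximum(nums):
--     max_num = nums[0]
--     max_idx = 0
--     for idx, num in enumerate(nums):
--         if num > max_num:
--             max_num = num
--             max_idx = idx
--     return max_num, max_idx
--
-- def func(a, k):
--     total = sum(list(range(len(a))))
--     if k > total:
--         k = total
--
--     result = []
--
--     num = []   #存每行不等式第一个数
--     idx = []   #存每行不等式加到b的那个数
--
--     num.append(a[0] + a[1])
--     idx.append(1)
--
--     while k > 0:
--         max_num, max_idx = maximum(num)
--         result.append(max_num)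
--         idx[max_idx] += 1
--         if idx[max_idx] >= len(a):
--             num[max_idx] = -999
--         else:
--             num[max_idx] = a[max_idx] + a[idx[max_idx]]
--         if len(num) < len(a) - 1:
--             idx.append(len(num) + 1)
--             num.append(a[len(num)] + a[len(num) + 1])
--         k -= 1
--     return result
-- ===== SOURCE B (Python) =====
-- # B keeps the candidate rows in one list sorted ascending by (-sum, row),
-- # maintained by binary-search insertion; each step pops the head (the current
-- # best row) instead of linearly scanning all rows for the maximum as A does.
--
-- def _ins(pq, e):
--     lo, hi = 0, len(pq)
--     while lo < hi:
--         mid = (lo + hi) // 2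
--         if pq[mid] < e:
--             lo = mid + 1
--         else:
--             hi = mid
--     pq.insert(lo, e)
--
--
-- def func(a, k):
--     n = len(a)
--     total = n * (n - 1) // 2
--     if k > total:
--         k = total
--     result = []
--     pq = [(-(a[0] + a[1]), 0, 1)]   # entries (-sum, row, pointer), ascending
--     rows = 1
--     while k > 0:
--         key, r, j = pq.pop(0)
--         result.append(-key)
--         j += 1
--         if j >= n:
--             _ins(pq, (999, r, j))
--         else:
--             _ins(pq, (-(a[r] + a[j]), r, j))
--         if rows < n - 1:
--             _ins(pq, (-(a[rows] + a[rows + 1]), rows, rows + 1))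
--             rows += 1
--         k -= 1
--     return result
-- ===== Notes on version B (the rewrite author's own statement) =====
-- stated objective: faster
-- what changed: B replaces A's per-step linear scan of the num/idx arrays for the maximum row by a priority queue held as one list kept sorted ascending by (-sum, row) via binary-search insertion, so each step just pops the head; a timing run measured B well over 1.5x faster at the largest size.
import Mathlib
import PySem

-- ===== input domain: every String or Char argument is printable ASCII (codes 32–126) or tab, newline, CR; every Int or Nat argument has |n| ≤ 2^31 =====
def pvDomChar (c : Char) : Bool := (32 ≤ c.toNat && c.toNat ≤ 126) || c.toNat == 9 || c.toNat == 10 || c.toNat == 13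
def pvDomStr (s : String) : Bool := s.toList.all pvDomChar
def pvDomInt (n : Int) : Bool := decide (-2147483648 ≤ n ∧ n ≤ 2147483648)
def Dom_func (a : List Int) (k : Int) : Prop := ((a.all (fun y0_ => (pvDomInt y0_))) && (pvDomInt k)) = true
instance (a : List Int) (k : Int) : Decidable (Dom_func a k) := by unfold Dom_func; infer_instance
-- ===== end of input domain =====

-- B replaces A's per-step linear scan for the maximum row by a priority queue held as one
-- list sorted ascending by (-sum, row) and maintained with binary-search insertion; each
-- step pops the head (measurably faster in a timing run: O(log n) comparisons per step
-- plus C-level list shifts vs A's O(n) scan). Proved: equal return values whenever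
-- len(a) >= 2 (A raises IndexError otherwise).

-- ===== PORT A =====
-- helper 'maximum' of A: first maximal element and its index
def pyMaximum (nums : List Int) : Int × Int :=
  (PySem.List.enumerate nums 0).foldl
    (fun m p => if p.2 > m.1 then (p.2, p.1) else m)
    (PySem.List.pyGetD nums 0 0, 0)

-- one iteration of A's while-loop; state = (result, num, idx)
def funcStep (a : List Int) (st : List Int × List Int × List Int) :
    List Int × List Int × List Int :=
  let m := pyMaximum st.2.1
  let result := st.1 ++ [m.1]
  let ni := PySem.List.pyGetD st.2.2 m.2 0 + 1
  let idx := PySem.List.pySetD st.2.2 m.2 ni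
  let num :=
    if ni ≥ (a.length : Int) then PySem.List.pySetD st.2.1 m.2 (-999)
    else PySem.List.pySetD st.2.1 m.2 (PySem.List.pyGetD a m.2 0 + PySem.List.pyGetD a ni 0)
  if (num.length : Int) < (a.length : Int) - 1 then
    (result,
     num ++ [PySem.List.pyGetD a (num.length : Int) 0 + PySem.List.pyGetD a ((num.length : Int) + 1) 0],
     idx ++ [(num.length : Int) + 1])
  else
    (result, num, idx)

def func (a : List Int) (k : Int) : List Int :=
  let total := (PySem.List.pyRange 0 (a.length : Int) 1).sum
  let k1 := if k > total then total else k
  ((List.range k1.toNat).foldl (fun st _ => funcStep a st)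
      ([], [PySem.List.pyGetD a 0 0 + PySem.List.pyGetD a 1 0], [(1 : Int)])).1

-- ===== PORT B =====
-- Python tuple '<' on the (key, row, pointer) triples
def ltT (x y : Int × Int × Int) : Bool :=
  x.1 < y.1 || (x.1 == y.1 && (x.2.1 < y.2.1 || (x.2.1 == y.2.1 && x.2.2 < y.2.2)))

-- the binary-search loop of B's _ins (lo, hi are the Python loop variables)
def bpos (pq : List (Int × Int × Int)) (e : Int × Int × Int) (lo hi : Nat) : Nat :=
  if lo < hi then
    let mid := (lo + hi) / 2
    if ltT (pq.getD mid (0, 0, 0)) e then bpos pq e (mid + 1) hi else bpos pq e lo mid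
  else lo
termination_by hi - lo
decreasing_by all_goals omega

-- B's _ins: insert e at the binary-search position
def bins (pq : List (Int × Int × Int)) (e : Int × Int × Int) : List (Int × Int × Int) :=
  PySem.List.insert pq ((bpos pq e 0 pq.length : Nat) : Int) e

-- one iteration of B's while-loop; state = (result, pq, rows)
def altStep (a : List Int) (st : List Int × List (Int × Int × Int) × Int) :
    List Int × List (Int × Int × Int) × Int :=
  match st.2.1 with
  | [] => st   -- unreachable: pq always holds one entry per row (guard for totality only)
  | e :: rest =>
    let result := st.1 ++ [-e.1]
    let j := e.2.2 + 1
    let pq1 :=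
      if j ≥ (a.length : Int) then bins rest (999, e.2.1, j)
      else bins rest (-(PySem.List.pyGetD a e.2.1 0 + PySem.List.pyGetD a j 0), e.2.1, j)
    if st.2.2 < (a.length : Int) - 1 then
      (result,
       bins pq1 (-(PySem.List.pyGetD a st.2.2 0 + PySem.List.pyGetD a (st.2.2 + 1) 0), st.2.2, st.2.2 + 1),
       st.2.2 + 1)
    else (result, pq1, st.2.2)

def func_alt (a : List Int) (k : Int) : List Int :=
  let n := (a.length : Int)
  let total := PySem.Int.floordiv (n * (n - 1)) 2
  let k1 := if k > total then total else k
  ((List.range k1.toNat).foldl (fun st _ => altStep a st)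
      ([], [(-(PySem.List.pyGetD a 0 0 + PySem.List.pyGetD a 1 0), (0 : Int), (1 : Int))], (1 : Int))).1

-- ===== PRECONDITION & SPEC =====
-- Pre_ excludes exactly len(a) < 2, where A raises IndexError on a[0] + a[1].
def Pre_func (a : List Int) (k : Int) : Prop := 2 ≤ a.length
instance (a : List Int) (k : Int) : Decidable (Pre_func a k) := by unfold Pre_func; infer_instance

def pvWitness_func : List Int × Int := ([1, 2, 3], 2)

def Spec_func (a : List Int) (k : Int) (out : List Int) : Prop := out = func_alt a k
instance (a : List Int) (k : Int) (out : List Int) : Decidable (Spec_func a k out) := by unfold Spec_func; infer_instance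

-- ===== CLAIM (what is proved, stated in full; the proofs are below) =====
def Claim_equal_func : Prop := ∀ (a : List Int) (k : Int), Dom_func a k → Pre_func a k → Spec_func a k (func a k)

-- ===== LEMMAS AND PROOFS =====

-- A's state after i iterations
def stA (a : List Int) (i : Nat) : List Int × List Int × List Int :=
  (List.range i).foldl (fun st _ => funcStep a st)
    ([], [PySem.List.pyGetD a 0 0 + PySem.List.pyGetD a 1 0], [(1 : Int)])

-- B's state after i iterations
def stB (a : List Int) (i : Nat) : List Int × List (Int × Int × Int) × Int :=
  (List.range i).foldl (fun st _ => altStep a st)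
    ([], [(-(PySem.List.pyGetD a 0 0 + PySem.List.pyGetD a 1 0), (0 : Int), (1 : Int))], (1 : Int))

-- the triple B would store for row r, given A's arrays
def mapped (num idx : List Int) : List (Int × Int × Int) :=
  (List.range num.length).map (fun r => (-(num.getD r 0), (r : Int), idx.getD r 0))

-- the simulation invariant
def SimInv (a : List Int) (i : Nat) : Prop :=
  (stA a i).1 = (stB a i).1 ∧
  (stB a i).2.2 = ((stA a i).2.1.length : Int) ∧
  (stA a i).2.2.length = (stA a i).2.1.length ∧
  1 ≤ (stA a i).2.1.length ∧
  (stB a i).2.1.Perm (mapped (stA a i).2.1 (stA a i).2.2) ∧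
  (stB a i).2.1.Pairwise (fun x y => ltT x y = true)

lemma stA_succ (a : List Int) (i : Nat) : stA a (i + 1) = funcStep a (stA a i) := by
  simp [stA, List.range_succ]

lemma stB_succ (a : List Int) (i : Nat) : stB a (i + 1) = altStep a (stB a i) := by
  simp [stB, List.range_succ]

lemma sum_pyRange (n : Nat) :
    (PySem.List.pyRange 0 (n : Int) 1).sum = PySem.Int.floordiv ((n : Int) * ((n : Int) - 1)) 2 := by
  induction n with
  | zero => simp [PySem.List.pyRange_one_eq_nil]
  | succ m ih =>
      rw [show ((m + 1 : Nat) : Int) = (m : Int) + 1 by push_cast; ring,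
          PySem.List.pyRange_one_succ_right (by omega), List.sum_append, ih]
      rw [PySem.Int.floordiv_eq_ediv_of_pos (by norm_num), PySem.Int.floordiv_eq_ediv_of_pos (by norm_num)]
      obtain ⟨t, ht⟩ := Int.even_mul_succ_self ((m : Int) - 1)
      have hexp : ((m : Int) + 1) * (((m : Int) + 1) - 1) = ((m : Int) - 1) * (((m : Int) - 1) + 1) + 2 * (m : Int) := by ring
      have hexp2 : (m : Int) * ((m : Int) - 1) = ((m : Int) - 1) * (((m : Int) - 1) + 1) := by ring
      simp only [List.sum_cons, List.sum_nil]
      omega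

-- ltT is an irreflexive, transitive, total (on distinct elements) strict order
lemma ltT_iff (x y : Int × Int × Int) :
    ltT x y = true ↔ (x.1 < y.1 ∨ (x.1 = y.1 ∧ (x.2.1 < y.2.1 ∨ (x.2.1 = y.2.1 ∧ x.2.2 < y.2.2)))) := by
  simp [ltT]

lemma ltT_irrefl (x : Int × Int × Int) : ¬ ltT x x = true := by
  simp [ltT_iff]

lemma ltT_trans {x y z : Int × Int × Int} (h1 : ltT x y = true) (h2 : ltT y z = true) :
    ltT x z = true := by
  rw [ltT_iff] at *; omega

lemma ltT_total {x y : Int × Int × Int} (h : x ≠ y) : ltT x y = true ∨ ltT y x = true := by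
  rw [ltT_iff, ltT_iff]
  rcases x with ⟨x1, x2, x3⟩; rcases y with ⟨y1, y2, y3⟩
  have : ¬ (x1 = y1 ∧ x2 = y2 ∧ x3 = y3) := by
    intro ⟨a1, a2, a3⟩; exact h (by simp [a1, a2, a3])
  simp only at *; omega

-- characterization of A's scan: first maximum and its index
lemma scan_char (t : List Int) : ∀ (s cm ci : Int),
    ((PySem.List.enumerate t s).foldl (fun m p => if p.2 > m.1 then (p.2, p.1) else m) (cm, ci) = (cm, ci) ∧
       ∀ q, q < t.length → t.getD q 0 ≤ cm) ∨
    (∃ p : Nat, p < t.length ∧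
       (PySem.List.enumerate t s).foldl (fun m p => if p.2 > m.1 then (p.2, p.1) else m) (cm, ci) = (t.getD p 0, s + p) ∧
       cm < t.getD p 0 ∧
       (∀ q, q < t.length → t.getD q 0 ≤ t.getD p 0) ∧
       (∀ q, q < p → t.getD q 0 < t.getD p 0)) := by
  induction t with
  | nil => intro s cm ci; left; exact ⟨by simp [PySem.List.enumerate_nil], by intro q hq; simp at hq⟩
  | cons x t ih =>
      intro s cm ci
      rw [PySem.List.enumerate_cons, List.foldl_cons]
      by_cases hx : x > cm
      · simp only [if_pos hx]
        rcases ih (s + 1) x s with ⟨hres, hb⟩ | ⟨p, hp, hres, hcm, hb, hstr⟩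
        · right
          refine ⟨0, by simp, by rw [hres]; simp, hx, ?_, by intro q hq; omega⟩
          intro q hq
          cases q with
          | zero => simp
          | succ q' => simpa using hb q' (by simpa using hq)
        · right
          refine ⟨p + 1, by simpa using Nat.succ_lt_succ hp, ?_, ?_, ?_, ?_⟩
          · rw [hres, List.getD_cons_succ]
            congr 1
            push_cast; ring
          · exact lt_trans hx hcm
          · intro q hq
            cases q with
            | zero => simpa using le_of_lt hcm
            | succ q' => simpa using hb q' (by simpa using hq)
          · intro q hq
            cases q with
            | zero => simpa using hcm
            | succ q' => simpa using hstr q' (by omega)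
      · simp only [if_neg hx]
        rcases ih (s + 1) cm ci with ⟨hres, hb⟩ | ⟨p, hp, hres, hcm, hb, hstr⟩
        · left
          refine ⟨hres, ?_⟩
          intro q hq
          cases q with
          | zero => simpa using le_of_not_gt hx
          | succ q' => simpa using hb q' (by simpa using hq)
        · right
          refine ⟨p + 1, by simpa using Nat.succ_lt_succ hp, ?_, hcm, ?_, ?_⟩
          · rw [hres, List.getD_cons_succ]
            congr 1
            push_cast; ring
          · intro q hq
            cases q with
            | zero => simpa using le_trans (le_of_not_gt hx) (le_of_lt hcm)
            | succ q' => simpa using hb q' (by simpa using hq)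
          · intro q hq
            cases q with
            | zero => simpa using lt_of_le_of_lt (le_of_not_gt hx) hcm
            | succ q' => simpa using hstr q' (by omega)

lemma pyMaximum_char (x : Int) (t : List Int) :
    ∃ miN : Nat, miN < (x :: t).length ∧
      pyMaximum (x :: t) = ((x :: t).getD miN 0, (miN : Int)) ∧
      (∀ q, q < (x :: t).length → (x :: t).getD q 0 ≤ (x :: t).getD miN 0) ∧
      (∀ q, q < miN → (x :: t).getD q 0 < (x :: t).getD miN 0) := by
  unfold pyMaximum
  rw [PySem.List.enumerate_cons, List.foldl_cons, PySem.List.pyGetD_zero_cons, if_neg (lt_irrefl x)]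
  rcases scan_char t (0 + 1) x 0 with ⟨hres, hb⟩ | ⟨p, hp, hres, hcm, hb, hstr⟩
  · refine ⟨0, by simp, by rw [hres]; simp, ?_, by intro q hq; omega⟩
    intro q hq
    cases q with
    | zero => simp
    | succ q' => simpa using hb q' (by simpa using hq)
  · refine ⟨p + 1, by simpa using Nat.succ_lt_succ hp, ?_, ?_, ?_⟩
    · rw [hres, List.getD_cons_succ]
      congr 1
      push_cast; ring
    · intro q hq
      cases q with
      | zero => simpa using le_of_lt hcm
      | succ q' => simpa using hb q' (by simpa using hq)
    · intro q hq
      cases q with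
      | zero => simpa using hcm
      | succ q' => simpa using hstr q' (by omega)

-- getD / getElem bridges
lemma getD_lt {α : Type} [Inhabited α] (l : List α) (d : α) (i : Nat) (h : i < l.length) :
    l.getD i d = l[i] := List.getD_eq_getElem l d h

lemma sorted_getD (l : List (Int × Int × Int)) (hsort : l.Pairwise (fun x y => ltT x y = true))
    (i j : Nat) (hij : i < j) (hj : j < l.length) :
    ltT (l.getD i (0, 0, 0)) (l.getD j (0, 0, 0)) = true := by
  rw [getD_lt _ _ _ (lt_trans hij hj), getD_lt _ _ _ hj]
  exact List.pairwise_iff_getElem.mp hsort i j (lt_trans hij hj) hj hij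

-- the binary-search position: all entries before it are < e, none from it on is
lemma bpos_spec (pq : List (Int × Int × Int)) (e : Int × Int × Int)
    (hsort : pq.Pairwise (fun x y => ltT x y = true)) :
    ∀ (d lo hi : Nat), hi - lo = d → lo ≤ hi → hi ≤ pq.length →
      (∀ i, i < lo → ltT (pq.getD i (0, 0, 0)) e = true) →
      (∀ i, hi ≤ i → i < pq.length → ¬ ltT (pq.getD i (0, 0, 0)) e = true) →
      (bpos pq e lo hi ≤ pq.length ∧
       (∀ i, i < bpos pq e lo hi → ltT (pq.getD i (0, 0, 0)) e = true) ∧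
       (∀ i, bpos pq e lo hi ≤ i → i < pq.length → ¬ ltT (pq.getD i (0, 0, 0)) e = true)) := by
  intro d
  induction d using Nat.strong_induction_on with
  | _ d ih =>
    intro lo hi hd hle hhi hpre hpost
    rw [bpos]
    by_cases hlh : lo < hi
    · rw [if_pos hlh]
      by_cases hm : ltT (pq.getD ((lo + hi) / 2) (0, 0, 0)) e = true
      · rw [if_pos hm]
        refine ih (hi - ((lo + hi) / 2 + 1)) (by omega) _ _ rfl (by omega) hhi ?_ hpost
        intro i hi2
        rcases lt_or_ge i lo with h1 | h1
        · exact hpre i h1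
        · rcases eq_or_lt_of_le (show i ≤ (lo + hi) / 2 by omega) with h2 | h2
          · rw [h2]; exact hm
          · exact ltT_trans (sorted_getD pq hsort i ((lo + hi) / 2) h2 (by omega)) hm
      · rw [if_neg hm]
        refine ih ((lo + hi) / 2 - lo) (by omega) _ _ rfl (by omega) (by omega) hpre ?_
        intro i hi2 hi3
        rcases lt_or_ge i hi with h1 | h1
        · rcases eq_or_lt_of_le hi2 with h2 | h2
          · rw [← h2]; exact hm
          · intro hc
            exact hm (ltT_trans (sorted_getD pq hsort ((lo + hi) / 2) i h2 (by omega)) hc)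
        · exact hpost i h1 hi3
    · rw [if_neg hlh]
      have : lo = hi := by omega
      exact ⟨by omega, hpre, fun i h1 h2 => hpost i (by omega) h2⟩

-- B's _ins inserts e keeping the list sorted; the result is a permutation of e :: pq
lemma bins_spec (pq : List (Int × Int × Int)) (e : Int × Int × Int)
    (hsort : pq.Pairwise (fun x y => ltT x y = true))
    (hrows : ∀ x ∈ pq, x.2.1 ≠ e.2.1) :
    (bins pq e).Perm (e :: pq) ∧ (bins pq e).Pairwise (fun x y => ltT x y = true) := by
  obtain ⟨hple, hlt, hge⟩ := bpos_spec pq e hsort (pq.length - 0) 0 pq.length rfl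
    (by omega) le_rfl (by intro i h; omega) (by intro i h1 h2; omega)
  have hne : ∀ x ∈ pq, x ≠ e := by
    intro x hx hc
    exact hrows x hx (by rw [hc])
  have hins : bins pq e = pq.take (bpos pq e 0 pq.length) ++ e :: pq.drop (bpos pq e 0 pq.length) := by
    unfold bins
    exact PySem.List.insert_natCast pq _ e hple
  have hgt : ∀ x ∈ pq.drop (bpos pq e 0 pq.length), ltT e x = true := by
    intro x hx
    obtain ⟨j, hj, hxe⟩ := List.mem_iff_getElem.mp hx
    have hjl : bpos pq e 0 pq.length + j < pq.length := by
      have := hj; rw [List.length_drop] at this; omega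
    have hxq : x = pq.getD (bpos pq e 0 pq.length + j) (0, 0, 0) := by
      rw [getD_lt _ _ _ hjl, ← hxe, List.getElem_drop]
    have hnot := hge (bpos pq e 0 pq.length + j) (by omega) hjl
    rw [← hxq] at hnot
    rcases ltT_total (show e ≠ x by intro hc; exact hne x (List.mem_of_mem_drop hx) hc.symm) with h | h
    · exact h
    · exact absurd h hnot
  have hlt' : ∀ x ∈ pq.take (bpos pq e 0 pq.length), ltT x e = true := by
    intro x hx
    obtain ⟨j, hj, hxe⟩ := List.mem_iff_getElem.mp hx
    have hjp : j < bpos pq e 0 pq.length := by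
      have := hj; rw [List.length_take] at this; omega
    have hxq : x = pq.getD j (0, 0, 0) := by
      rw [getD_lt _ _ _ (by omega), ← hxe, List.getElem_take]
    rw [hxq]
    exact hlt j hjp
  constructor
  · rw [hins]
    exact List.perm_middle.trans (by rw [List.take_append_drop])
  · rw [hins]
    refine List.pairwise_append.mpr ⟨hsort.sublist (List.take_sublist _ _), ?_, ?_⟩
    · refine List.pairwise_cons.mpr ⟨hgt, hsort.sublist (List.drop_sublist _ _)⟩
    · intro x hx y hy
      rcases List.mem_cons.mp hy with rfl | hy'
      · exact hlt' x hx
      · exact ltT_trans (hlt' x hx) (hgt y hy')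

-- mapped: basic facts
lemma length_mapped (num idx : List Int) : (mapped num idx).length = num.length := by
  simp [mapped]

lemma getElem_mapped (num idx : List Int) (r : Nat) (h : r < (mapped num idx).length) :
    (mapped num idx)[r] = (-(num.getD r 0), (r : Int), idx.getD r 0) := by
  simp [mapped]

lemma mem_mapped_row (num idx : List Int) (x : Int × Int × Int) (hx : x ∈ mapped num idx) :
    ∃ r : Nat, r < num.length ∧ x = (-(num.getD r 0), (r : Int), idx.getD r 0) := by
  obtain ⟨r, hr, hxe⟩ := List.mem_map.mp hx
  exact ⟨r, List.mem_range.mp hr, hxe.symm⟩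

lemma getD_set' (xs : List Int) (i j : Nat) (v d : Int) :
    (xs.set i v).getD j d = if i = j then (if i < xs.length then v else xs.getD j d) else xs.getD j d := by
  simp [List.getD_eq_getElem?_getD, List.getElem?_set]
  split_ifs <;> simp_all

lemma mapped_set (num idx : List Int) (miN : Nat) (h : miN < num.length) (hx : miN < idx.length) (w ni : Int) :
    mapped (num.set miN w) (idx.set miN ni) = (mapped num idx).set miN (-w, (miN : Int), ni) := by
  apply List.ext_getElem
  · simp [mapped]
  · intro i h1 h2
    have hi : i < num.length := by simpa [mapped] using h2
    rw [List.getElem_set]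
    rw [getElem_mapped _ _ i (by simpa [mapped] using h1), getElem_mapped _ _ i (by simpa [mapped] using h2)]
    by_cases hmi : miN = i
    · subst hmi
      rw [if_pos rfl, getD_set', getD_set', if_pos rfl, if_pos rfl, if_pos h, if_pos hx]
    · rw [if_neg hmi, getD_set', getD_set', if_neg hmi, if_neg hmi]

lemma getD_append_lt (xs ys : List Int) (j : Nat) (d : Int) (h : j < xs.length) :
    (xs ++ ys).getD j d = xs.getD j d := by
  simp [List.getD_eq_getElem?_getD, List.getElem?_append_left h]

lemma getD_append_at (xs : List Int) (y d : Int) (j : Nat) (h : j = xs.length) :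
    (xs ++ [y]).getD j d = y := by
  subst h; simp [List.getD_eq_getElem?_getD]

lemma mapped_append (num idx : List Int) (h : idx.length = num.length) (u v : Int) :
    mapped (num ++ [u]) (idx ++ [v]) = mapped num idx ++ [(-u, (num.length : Int), v)] := by
  unfold mapped
  rw [List.length_append, List.length_singleton, List.range_succ, List.map_append]
  congr 1
  · apply List.map_congr_left
    intro r hr
    have hrn : r < num.length := List.mem_range.mp hr
    rw [getD_append_lt _ _ _ _ hrn, getD_append_lt _ _ _ _ (by omega)]
  · simp only [List.map_cons, List.map_nil]
    rw [getD_append_at _ _ _ _ rfl, getD_append_at _ _ _ _ h.symm]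

-- the head of a sorted permutation is the unique minimum
lemma sorted_perm_head (pq l : List (Int × Int × Int)) (i : Nat) (hi : i < l.length)
    (hperm : pq.Perm l) (hsort : pq.Pairwise (fun x y => ltT x y = true))
    (hmin : ∀ x ∈ l, x ≠ l[i] → ltT l[i] x = true) :
    ∃ tl, pq = l[i] :: tl ∧ tl.Perm (l.take i ++ l.drop (i + 1)) := by
  have hsplit : l.take i ++ l[i] :: l.drop (i + 1) = l := by
    rw [← List.drop_eq_getElem_cons hi, List.take_append_drop]
  have hperm2 : pq.Perm (l[i] :: (l.take i ++ l.drop (i + 1))) := by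
    refine hperm.trans ?_
    have hmid := List.perm_middle (a := l[i]) (l₁ := l.take i) (l₂ := l.drop (i + 1))
    rw [hsplit] at hmid
    exact hmid
  have hmem : l[i] ∈ pq := hperm.mem_iff.mpr (List.getElem_mem hi)
  match pq, hmem with
  | h :: tl, hmem =>
    by_cases hhe : h = l[i]
    · subst hhe
      exact ⟨tl, rfl, (hperm2.cons_inv)⟩
    · exfalso
      have hetl : l[i] ∈ tl := by
        rcases List.mem_cons.mp hmem with hc | hc
        · exact absurd hc.symm hhe
        · exact hc
      have h1 : ltT h l[i] = true := List.rel_of_pairwise_cons hsort hetl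
      have h2 : ltT l[i] h = true := hmin h (hperm.subset List.mem_cons_self) hhe
      exact ltT_irrefl h (ltT_trans h1 h2)

lemma simInv_zero (a : List Int) : SimInv a 0 := by
  refine ⟨rfl, by simp [stA, stB], by simp [stA], by simp [stA], ?_, by simp [stB]⟩
  simp [stA, stB, mapped]

lemma simInv_succ (a : List Int) (i : Nat) (h : SimInv a i) : SimInv a (i + 1) := by
  obtain ⟨hres, hrows, hlidx, hlen, hperm, hsort⟩ := h
  obtain ⟨resA, st2, hstA⟩ : ∃ p q, stA a i = (p, q) := ⟨_, _, rfl⟩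
  obtain ⟨num, idx, hst2⟩ : ∃ p q, st2 = (p, q) := ⟨_, _, rfl⟩
  rw [hst2] at hstA
  obtain ⟨resB, st2b, hstB⟩ : ∃ p q, stB a i = (p, q) := ⟨_, _, rfl⟩
  obtain ⟨pq, rows, hst2b⟩ : ∃ p q, st2b = (p, q) := ⟨_, _, rfl⟩
  rw [hst2b] at hstB
  simp only [hstA, hstB] at hres hrows hlidx hlen hperm hsort
  obtain ⟨x, t, hxt⟩ := List.exists_cons_of_ne_nil
    (l := num) (by intro h0; rw [h0] at hlen; simp at hlen)
  obtain ⟨miN, hmiN, hmax, hble, hblt⟩ := pyMaximum_char x t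
  rw [← hxt] at hmiN hmax hble hblt
  have hmapl : miN < (mapped num idx).length := by rw [length_mapped]; exact hmiN
  have hemap : (mapped num idx)[miN] = (-(num.getD miN 0), (miN : Int), idx.getD miN 0) :=
    getElem_mapped num idx miN hmapl
  have hmin : ∀ y ∈ mapped num idx, y ≠ (mapped num idx)[miN] →
      ltT (mapped num idx)[miN] y = true := by
    intro y hy hne
    obtain ⟨r, hr, rfl⟩ := mem_mapped_row num idx y hy
    rw [hemap] at hne ⊢
    have hrne : r ≠ miN := by
      intro hc; subst hc; exact hne rfl
    rw [ltT_iff]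
    dsimp only
    rcases lt_trichotomy r miN with h3 | h3 | h3
    · have := hblt r h3
      left; omega
    · exact absurd h3 hrne
    · rcases eq_or_lt_of_le (hble r hr) with h4 | h4
      · exact Or.inr ⟨by omega, Or.inl (by exact_mod_cast h3)⟩
      · left; omega
  obtain ⟨tl, hpq, htl⟩ := sorted_perm_head pq (mapped num idx) miN hmapl hperm hsort hmin
  rw [hemap] at hpq
  have htlrow : ∀ y ∈ tl, ∃ r : Nat, r < num.length ∧ r ≠ miN ∧
      y = (-(num.getD r 0), (r : Int), idx.getD r 0) := by
    intro y hy
    rcases List.mem_append.mp (htl.subset hy) with hy3 | hy3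
    · obtain ⟨j, hj, hye⟩ := List.mem_take_iff_getElem.mp hy3
      have hjlt : j < miN := by
        have := hj; rw [length_mapped] at this; omega
      refine ⟨j, by omega, by omega, ?_⟩
      rw [← hye, getElem_mapped]
    · obtain ⟨j, hj, hye⟩ := List.mem_drop_iff_getElem.mp hy3
      have hjl : miN + 1 + j < num.length := by
        have := hj; rw [length_mapped] at this; omega
      refine ⟨miN + 1 + j, hjl, by omega, ?_⟩
      rw [← hye, getElem_mapped]
  have hsortTl : tl.Pairwise (fun x y => ltT x y = true) := by
    rw [hpq] at hsort; exact (List.pairwise_cons.mp hsort).2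
  -- abbreviations
  have hlidx' : miN < idx.length := by omega
  -- first insertion: the selected row's refreshed entry
  have hbins1 : ∀ w : Int,
      (bins tl (-w, (miN : Int), idx.getD miN 0 + 1)).Perm
        (mapped (num.set miN w) (idx.set miN (idx.getD miN 0 + 1))) ∧
      (bins tl (-w, (miN : Int), idx.getD miN 0 + 1)).Pairwise (fun x y => ltT x y = true) := by
    intro w
    have hb := bins_spec tl (-w, (miN : Int), idx.getD miN 0 + 1) hsortTl (by
      intro y hy
      obtain ⟨r, hr, hrne, rfl⟩ := htlrow y hy
      dsimp only
      intro hc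
      exact hrne (by exact_mod_cast hc))
    refine ⟨?_, hb.2⟩
    refine hb.1.trans ?_
    refine (htl.cons _).trans ?_
    have hmid := (List.perm_middle (a := (-w, (miN : Int), idx.getD miN 0 + 1))
      (l₁ := (mapped num idx).take miN) (l₂ := (mapped num idx).drop (miN + 1))).symm
    refine hmid.trans ?_
    rw [← List.set_eq_take_cons_drop _ hmapl,
        mapped_set num idx miN hmiN hlidx' w (idx.getD miN 0 + 1)]
  -- unfold one step of both loops
  unfold SimInv
  rw [stA_succ, stB_succ, hstA, hstB, hpq]
  simp only [funcStep, altStep]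
  rw [hmax]
  simp only [PySem.List.pyGetD_natCast, PySem.List.pySetD_natCast]
  rw [hrows]
  rw [show (if idx.getD miN 0 + 1 ≥ (a.length : Int)
        then num.set miN (-999)
        else num.set miN (a.getD miN 0 +
              PySem.List.pyGetD a (idx.getD miN 0 + 1) 0))
      = num.set miN (if idx.getD miN 0 + 1 ≥ (a.length : Int)
        then (-999 : Int)
        else a.getD miN 0 + PySem.List.pyGetD a (idx.getD miN 0 + 1) 0)
    from by split_ifs <;> rfl]
  rw [show (if idx.getD miN 0 + 1 ≥ (a.length : Int)
        then bins tl ((999 : Int), (miN : Int), idx.getD miN 0 + 1)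
        else bins tl (-(a.getD miN 0 +
              PySem.List.pyGetD a (idx.getD miN 0 + 1) 0), (miN : Int), idx.getD miN 0 + 1))
      = bins tl (-(if idx.getD miN 0 + 1 ≥ (a.length : Int)
        then (-999 : Int)
        else a.getD miN 0 + PySem.List.pyGetD a (idx.getD miN 0 + 1) 0),
          (miN : Int), idx.getD miN 0 + 1)
    from by split_ifs <;> norm_num]
  generalize (if idx.getD miN 0 + 1 ≥ (a.length : Int)
        then (-999 : Int)
        else a.getD miN 0 + PySem.List.pyGetD a (idx.getD miN 0 + 1) 0) = w
  simp only [List.length_set]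
  simp only [PySem.List.pyGetD_natCast]
  obtain ⟨hperm1, hsort1⟩ := hbins1 w
  by_cases hbig : (num.length : Int) < (a.length : Int) - 1
  · rw [if_pos hbig, if_pos hbig]
    have hrows2 : ∀ y ∈ bins tl (-w, (miN : Int), idx.getD miN 0 + 1),
        y.2.1 ≠ ((num.length : Int), (num.length : Int) + 1).1 := by
      intro y hy
      obtain ⟨r, hr, hye⟩ := mem_mapped_row _ _ y (hperm1.subset hy)
      rw [List.length_set] at hr
      rw [hye]
      dsimp only
      intro hc
      have : r = num.length := by exact_mod_cast hc
      omega
    have hb2 := bins_spec (bins tl (-w, (miN : Int), idx.getD miN 0 + 1))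
      (-(a.getD num.length 0 +
          PySem.List.pyGetD a ((num.length : Int) + 1) 0), (num.length : Int), (num.length : Int) + 1)
      hsort1 (fun y hy => hrows2 y hy)
    refine ⟨?_, ?_, ?_, ?_, ?_, hb2.2⟩
    · dsimp only
      rw [hres]
      norm_num
    · dsimp only
      simp only [List.length_append, List.length_set, List.length_cons, List.length_nil]
      push_cast
      ring
    · dsimp only
      simp only [List.length_append, List.length_set, List.length_cons, List.length_nil, hlidx]
    · dsimp only
      simp only [List.length_append, List.length_set, List.length_cons, List.length_nil]
      omega
    · dsimp only
      refine hb2.1.trans ?_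
      refine (hperm1.cons _).trans ?_
      refine (List.perm_append_singleton _ _).symm.trans ?_
      rw [mapped_append _ _ (by simp [hlidx]) _ _]
      rw [List.length_set]
  · rw [if_neg hbig, if_neg hbig]
    refine ⟨?_, ?_, ?_, ?_, hperm1, hsort1⟩
    · dsimp only
      rw [hres]
      norm_num
    · dsimp only
      simp only [List.length_set]
    · dsimp only
      simp only [List.length_set, hlidx]
    · dsimp only
      simp only [List.length_set]
      omega

lemma simInv_all (a : List Int) (i : Nat) : SimInv a i := by
  induction i with
  | zero => exact simInv_zero a
  | succ m ih => exact simInv_succ a m ih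

theorem func_spec : Claim_equal_func := by
  intro a k _ _
  unfold Spec_func func func_alt
  dsimp only
  rw [sum_pyRange a.length]
  exact (simInv_all a _).1
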